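-- pv_equiv track=rewrite | github.com/hosle/EaglePy2025 | src/array/warehouse_process.py | solution
-- ===== SOURCE A (Python) =====
-- def solution(warehouse:list, tasks:list) -> list:
--
--     f_result = []
--     end_id = 0
--
--     for item in tasks:
--         if item == -1:
--             end_id = 0
--             continue
--
--         end_id = find_last_warehouse_id(item, warehouse, end_id)
--
--         f_result.append(end_id)
--
--     return f_result
--
-- def find_last_warehouse_id(amount, wh, start_id) -> int:
--     accumulated = wh[start_id]
--     warehouse_size = len(wh)
--     i = start_id
--
--     while accumulated < amount:
--         i = (i + 1) % warehouse_size
--         accumulated += wh[i]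
--
--     return i
-- ===== SOURCE B (Python) =====
-- def solution(warehouse: list, tasks: list) -> list:
--     n = len(warehouse)
--     prefix = [0]
--     for x in warehouse:
--         prefix.append(prefix[-1] + x)
--     total = prefix[n]
--     out = []
--     s = 0
--     for item in tasks:
--         if item == -1:
--             s = 0
--             continue
--         # g(t) = sum of t slots starting at s (wrapping once, t <= n)
--         def g(t):
--             e = s + t
--             return prefix[e] - prefix[s] if e <= n else total - prefix[s] + prefix[e - n]
--         t = None
--         for t0 in range(1, n + 1):
--             if g(t0) >= item:
--                 t = t0
--                 break
--         if t is None: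
--             # no window within one cycle reaches item: jump whole cycles analytically
--             t = min(t0 + n * ((item - g(t0) + total - 1) // total) for t0 in range(1, n + 1))
--         s = (s + t - 1) % n
--         out.append(s)
--     return out
-- ===== Notes on version B (the rewrite author's own statement) =====
-- stated objective: alternative
-- what changed: A simulates the accumulation step by step, possibly walking the warehouse many full cycles per task; B builds a prefix-sum table once, scans at most one cycle per task, and when a task needs several full cycles it computes the number of cycles in closed form by ceiling division and takes the minimum candidate instead of simulating them.
import Mathlib
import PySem

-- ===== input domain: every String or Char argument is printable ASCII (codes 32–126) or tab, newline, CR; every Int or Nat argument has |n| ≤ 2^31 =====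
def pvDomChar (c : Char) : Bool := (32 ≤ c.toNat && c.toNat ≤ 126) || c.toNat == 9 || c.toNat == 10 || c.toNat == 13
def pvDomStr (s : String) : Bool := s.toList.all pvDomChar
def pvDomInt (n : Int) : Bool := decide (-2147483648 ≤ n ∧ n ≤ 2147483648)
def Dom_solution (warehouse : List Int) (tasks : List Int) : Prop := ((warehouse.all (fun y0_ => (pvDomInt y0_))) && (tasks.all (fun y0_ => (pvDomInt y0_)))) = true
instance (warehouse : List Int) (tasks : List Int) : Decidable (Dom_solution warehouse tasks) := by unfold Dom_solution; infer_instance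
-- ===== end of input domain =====

-- B replaces A's step-by-step (possibly many-cycles) accumulation walk by a prefix-sum
-- table, a single-cycle scan per task and a closed-form ceiling-division cycle count.

-- ===== PORT A =====
-- fuel bound that makes the while loop total; under Pre_ it is ample (proved below)
def pvAbsSum (wh : List Int) : Nat := (wh.map Int.natAbs).sum

-- the 'while accumulated < amount' loop of find_last_warehouse_id, step for step;
-- indices are nonnegative Python ints, modelled as Nat; wh[i] is in range under Pre_,
-- so getD is exact there
def pvFindLoop (amount : Int) (wh : List Int) : Nat → Nat → Int → Nat
  | 0, i, _ => i
  | fuel+1, i, acc =>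
    if acc < amount then
      let i' := (i+1) % wh.length
      pvFindLoop amount wh fuel i' (acc + wh.getD i' 0)
    else i

def findLastWarehouseId (amount : Int) (wh : List Int) (startId : Nat) : Nat :=
  pvFindLoop amount wh (wh.length * (1 + amount.toNat + pvAbsSum wh)) startId (wh.getD startId 0)

def solA_step (warehouse : List Int) (st : Nat × List Int) (item : Int) : Nat × List Int :=
  if item = -1 then (0, st.2)
  else
    let e := findLastWarehouseId item warehouse st.1
    (e, st.2 ++ [(e : Int)])

def solution (warehouse : List Int) (tasks : List Int) : List Int :=
  (tasks.foldl (solA_step warehouse) (0, [])).2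

-- ===== PORT B =====
-- prefix = [0]; for x in warehouse: prefix.append(prefix[-1] + x)
def pvPrefix (wh : List Int) : List Int :=
  wh.foldl (fun p x => p ++ [(PySem.List.pyGet? p (-1)).getD 0 + x]) [0]

-- Source B's g(t); all prefix indices are in range under Pre_, so getD is exact there
def pvG (pfx : List Int) (total : Int) (n s t : Nat) : Int :=
  if s + t ≤ n then pfx.getD (s+t) 0 - pfx.getD s 0
  else total - pfx.getD s 0 + pfx.getD (s+t-n) 0

-- the 'for t0 in range(1, n+1): … break' scan
def pvScan (gf : Nat → Int) (item : Int) : Nat → Nat → Option Nat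
  | _, 0 => none
  | t0, k+1 => if item ≤ gf t0 then some t0 else pvScan gf item (t0+1) k

-- per-task index of Source B; the ceiling quotient is ≥ 1 whenever this branch runs on a
-- Pre_ input (all one-cycle windows fall short and total > 0), so .toNat is exact there,
-- and the candidate list is nonempty, so min?.getD is Python's min
def pvFindB (wh : List Int) (item : Int) (s : Nat) : Nat :=
  let n := wh.length
  let pfx := pvPrefix wh
  let total := pfx.getD n 0
  let gf := pvG pfx total n s
  let t := (pvScan gf item 1 n).getD
      ((((List.range' 1 n).map (fun t0 =>
          t0 + n * (PySem.Int.floordiv (item - gf t0 + total - 1) total).toNat)).min?).getD 0)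
  (s + t - 1) % n

def solB_step (warehouse : List Int) (st : Nat × List Int) (item : Int) : Nat × List Int :=
  if item = -1 then (0, st.2)
  else
    let e := pvFindB warehouse item st.1
    (e, st.2 ++ [(e : Int)])

def solution_alt (warehouse : List Int) (tasks : List Int) : List Int :=
  (tasks.foldl (solB_step warehouse) (0, [])).2

-- ===== PRECONDITION & SPEC =====
-- Declarative spec-level ingredients of the precondition (window sums over one cycle;
-- not the ports' code): pvWin wh s r = stock of the r slots starting at slot s.
def pvWin (wh : List Int) (s r : Nat) : Int := (((wh ++ wh).drop s).take r).sum
-- some window of at most one cycle starting at s reaches amount t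
def pvReach (wh : List Int) (s : Nat) (t : Int) : Bool :=
  (List.range' 1 wh.length).any (fun r => decide (t ≤ pvWin wh s r))
-- the shortest such window
def pvLeastR (wh : List Int) (s : Nat) (t : Int) : Nat :=
  ((List.range' 1 wh.length).find? (fun r => decide (t ≤ pvWin wh s r))).getD 0
-- declarative termination condition of A when the total stock is nonpositive: every task
-- amount must be reachable within one cycle of its current slot (then the walk can never
-- gain from a full cycle, so reaching it at all means reaching it within one cycle)
def pvPreLoop (wh : List Int) : Nat → List Int → Bool
  | _, [] => true
  | s, t :: ts =>
    if t = -1 then pvPreLoop wh 0 ts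
    else pvReach wh s t && pvPreLoop wh ((s + pvLeastR wh s t - 1) % wh.length) ts

-- Pre_ admits exactly the inputs on which A returns: it excludes the empty warehouse with
-- a task ≠ -1 (A raises IndexError) and the inputs on which A's while loop never
-- terminates (nonpositive total stock and some task amount unreachable within one cycle
-- of the slot the walk is at); on every input A returns on, Pre_ holds.
def Pre_solution (warehouse : List Int) (tasks : List Int) : Prop :=
  (warehouse ≠ [] ∨ ∀ t ∈ tasks, t = -1) ∧
  (0 < warehouse.sum ∨ pvPreLoop warehouse 0 tasks = true)
instance (warehouse : List Int) (tasks : List Int) : Decidable (Pre_solution warehouse tasks) := by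
  unfold Pre_solution; infer_instance

def pvWitness_solution : List Int × List Int := ([3, 1, 4], [2, -1, 7, 5])

def Spec_solution (warehouse : List Int) (tasks : List Int) (out : List Int) : Prop := out = solution_alt warehouse tasks
instance (warehouse : List Int) (tasks : List Int) (out : List Int) : Decidable (Spec_solution warehouse tasks out) := by unfold Spec_solution; infer_instance

-- ===== CLAIM (what is proved, stated in full; the proofs are below) =====
def Claim_equal_solution : Prop := ∀ (warehouse : List Int) (tasks : List Int), Dom_solution warehouse tasks → Pre_solution warehouse tasks → Spec_solution warehouse tasks (solution warehouse tasks)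

-- ===== LEMMAS AND PROOFS =====

-- the running sum of t slots starting at slot s (wrapping modulo the warehouse size)
def gsum (wh : List Int) (s : Nat) : Nat → Int
  | 0 => 0
  | t+1 => gsum wh s t + wh.getD ((s+t) % wh.length) 0

lemma gsum_append (wh : List Int) (s a b : Nat) :
    gsum wh s (a + b) = gsum wh s a + gsum wh (s + a) b := by
  induction b with
  | zero => simp [gsum]
  | succ b ih =>
      have : a + (b + 1) = (a + b) + 1 := by omega
      rw [this]
      show gsum wh s (a+b) + wh.getD ((s + (a+b)) % wh.length) 0 = _
      rw [ih]
      show _ = gsum wh s a + (gsum wh (s+a) b + wh.getD ((s + a + b) % wh.length) 0)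
      have : s + (a + b) = s + a + b := by omega
      rw [this]; ring

lemma gsum_rotate (wh : List Int) (h : 0 < wh.length) (k : Nat) :
    gsum wh (k+1) wh.length = gsum wh k wh.length := by
  obtain ⟨m, hm⟩ : ∃ m, wh.length = m + 1 := ⟨wh.length - 1, by omega⟩
  have h1 : gsum wh k (1 + m) = gsum wh k 1 + gsum wh (k+1) m := gsum_append wh k 1 m
  have h2 : gsum wh (k+1) (m+1) = gsum wh (k+1) m + wh.getD ((k+1+m) % wh.length) 0 := rfl
  have h3 : (k+1+m) % wh.length = k % wh.length := by
    rw [hm]; have : k + 1 + m = k + (m+1) := by omega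
    rw [this, Nat.add_mod_right]
  have h4 : gsum wh k 1 = wh.getD (k % wh.length) 0 := by simp [gsum]
  rw [hm]; rw [h2, h3]
  have : m + 1 = 1 + m := by omega
  rw [this, h1, h4]; ring

lemma gsum_take (wh : List Int) (s t : Nat) (h : s + t ≤ wh.length) :
    gsum wh s t = (wh.take (s+t)).sum - (wh.take s).sum := by
  induction t with
  | zero => simp [gsum]
  | succ t ih =>
      have hlt : s + t < wh.length := by omega
      have hstep : wh.take (s+t+1) = wh.take (s+t) ++ [wh[s+t]] := by
        rw [List.take_add_one]
        simp [List.getElem?_eq_getElem hlt]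
      show gsum wh s t + wh.getD ((s+t) % wh.length) 0 = _
      rw [ih (by omega), Nat.mod_eq_of_lt hlt, List.getD_eq_getElem?_getD,
        List.getElem?_eq_getElem hlt, show s+(t+1) = s+t+1 from rfl, hstep,
        List.sum_append]
      simp
      ring

lemma gsum_full (wh : List Int) (h : 0 < wh.length) (k : Nat) :
    gsum wh k wh.length = wh.sum := by
  induction k with
  | zero =>
      have := gsum_take wh 0 wh.length (by omega)
      simpa [List.take_of_length_le (le_refl wh.length)] using this
  | succ k ih => rw [gsum_rotate wh h k, ih]

lemma gsum_cycle (wh : List Int) (h : 0 < wh.length) (s t : Nat) :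
    gsum wh s (t + wh.length) = gsum wh s t + wh.sum := by
  rw [gsum_append, gsum_full wh h]

lemma gsum_cycles (wh : List Int) (h : 0 < wh.length) (s t q : Nat) :
    gsum wh s (t + q * wh.length) = gsum wh s t + q * wh.sum := by
  induction q with
  | zero => simp
  | succ q ih =>
      have : t + (q+1) * wh.length = (t + q * wh.length) + wh.length := by ring
      rw [this, gsum_cycle wh h, ih]; push_cast; ring

lemma gsum_one_lt (wh : List Int) (s : Nat) (hs : s < wh.length) :
    gsum wh s 1 = wh.getD s 0 := by
  simp [gsum, Nat.mod_eq_of_lt hs]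

lemma abs_le_absSum (wh : List Int) (x : Int) (hx : x ∈ wh) : x.natAbs ≤ pvAbsSum wh := by
  unfold pvAbsSum
  exact List.le_sum_of_mem (List.mem_map_of_mem hx)

-- pvWin agrees with the wrapping window sum within one cycle
lemma pvWin_succ (wh : List Int) (s r : Nat) (h : s + r < (wh ++ wh).length) :
    pvWin wh s (r+1) = pvWin wh s r + (wh ++ wh).getD (s+r) 0 := by
  unfold pvWin
  rw [List.take_succ, List.sum_append]
  congr 1
  rw [List.getElem?_drop]
  rw [List.getElem?_eq_getElem h]
  simp [List.getD_eq_getElem?_getD, List.getElem?_eq_getElem h]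

lemma pvWin_eq_gsum (wh : List Int) (s r : Nat) (hs : s < wh.length) (hr : r ≤ wh.length) :
    pvWin wh s r = gsum wh s r := by
  induction r with
  | zero => simp [pvWin, gsum]
  | succ r ih =>
      rw [pvWin_succ wh s r (by simp; omega)]
      rw [ih (by omega)]
      show _ = gsum wh s r + wh.getD ((s+r) % wh.length) 0
      congr 1
      by_cases hcase : s + r < wh.length
      · rw [Nat.mod_eq_of_lt hcase, List.getD_eq_getElem?_getD, List.getD_eq_getElem?_getD,
          List.getElem?_append_left hcase]
      · have h1 : wh.length ≤ s + r := by omega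
        have h2 : (s + r) % wh.length = s + r - wh.length := by
          rw [Nat.mod_eq_sub_mod h1, Nat.mod_eq_of_lt (by omega)]
        rw [h2, List.getD_eq_getElem?_getD, List.getD_eq_getElem?_getD,
          List.getElem?_append_right h1]

lemma pvReach_iff (wh : List Int) (s : Nat) (t : Int) :
    pvReach wh s t = true ↔ ∃ r, 1 ≤ r ∧ r ≤ wh.length ∧ t ≤ pvWin wh s r := by
  unfold pvReach
  rw [List.any_eq_true]
  constructor
  · rintro ⟨r, hr, hp⟩
    rw [List.mem_range'] at hr
    obtain ⟨i, hi, rfl⟩ := hr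
    exact ⟨1 + i * 1, by omega, by omega, by simpa using hp⟩
  · rintro ⟨r, h1, h2, h3⟩
    exact ⟨r, by rw [List.mem_range']; exact ⟨r - 1, by omega, by omega⟩, by simpa using h3⟩

-- find? on range' returns the least index satisfying the predicate
lemma find?_range'_eq (p : Nat → Bool) (τ : Nat) (hp : p τ = true) :
    ∀ k t0, t0 ≤ τ → τ < t0 + k → (∀ u, t0 ≤ u → u < τ → p u = false) →
      (List.range' t0 k).find? p = some τ := by
  intro k
  induction k with
  | zero => intro t0 h1 h2 _; omega
  | succ k ih =>
      intro t0 h1 h2 hf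
      have hcons : List.range' t0 (k+1) = t0 :: List.range' (t0+1) k := rfl
      rw [hcons, List.find?_cons]
      by_cases he : t0 = τ
      · subst he; rw [hp]
      · rw [hf t0 (le_refl _) (by omega)]
        exact ih (t0+1) (by omega) (by omega) (fun u hu1 hu2 => hf u (by omega) hu2)

-- the 'while accumulated < amount' loop returns slot (s + τ - 1) % n, τ the least reaching length
lemma loopA (wh : List Int) (item : Int) (s τ : Nat)
    (h1 : 1 ≤ τ) (hτ : item ≤ gsum wh s τ)
    (hmin : ∀ t, 1 ≤ t → t < τ → gsum wh s t < item) :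
    ∀ fuel m, m + 1 ≤ τ → τ ≤ m + 1 + fuel →
      pvFindLoop item wh fuel ((s+m) % wh.length) (gsum wh s (m+1)) = (s + (τ-1)) % wh.length := by
  intro fuel
  induction fuel with
  | zero =>
      intro m hm1 hm2
      have : τ = m + 1 := by omega
      subst this
      simp [pvFindLoop]
  | succ fuel ih =>
      intro m hm1 hm2
      by_cases hlt : gsum wh s (m+1) < item
      · have hm1' : m + 1 < τ := by
          rcases Nat.lt_or_ge (m+1) τ with h | h
          · exact h
          · exfalso; have : τ = m+1 := by omega
            subst this; omega
        rw [pvFindLoop, if_pos hlt]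
        have hi : ((s+m) % wh.length + 1) % wh.length = (s + (m+1)) % wh.length := by
          rw [Nat.mod_add_mod, Nat.add_assoc]
        have hacc : gsum wh s (m+1) + wh.getD ((s + (m+1)) % wh.length) 0 = gsum wh s (m+2) := rfl
        simp only [hi, hacc]
        exact ih (m+1) (by omega) (by omega)
      · have heq : τ = m + 1 := by
          rcases Nat.lt_or_ge (m+1) τ with h | h
          · exact absurd (hmin (m+1) (by omega) h) (by omega)
          · omega
        subst heq
        rw [pvFindLoop, if_neg hlt]
        norm_num

lemma findA_eq (wh : List Int) (item : Int) (s τ : Nat) (h : 0 < wh.length)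
    (hs : s < wh.length)
    (h1 : 1 ≤ τ) (hτ : item ≤ gsum wh s τ)
    (hmin : ∀ t, 1 ≤ t → t < τ → gsum wh s t < item)
    (hbound : τ ≤ 1 + (item.toNat + pvAbsSum wh) * wh.length) :
    findLastWarehouseId item wh s = (s + (τ-1)) % wh.length := by
  unfold findLastWarehouseId
  have hacc : wh.getD s 0 = gsum wh s 1 := (gsum_one_lt wh s hs).symm
  rw [hacc]
  have hl := loopA wh item s τ h1 hτ hmin (wh.length * (1 + item.toNat + pvAbsSum wh)) 0
    (by omega)
    (by
      have hmm : (item.toNat + pvAbsSum wh) * wh.length ≤ wh.length * (1 + item.toNat + pvAbsSum wh) := by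
        rw [Nat.mul_comm]
        exact Nat.mul_le_mul_left wh.length (by omega)
      omega)
  simp only [Nat.add_zero, Nat.mod_eq_of_lt hs] at hl
  exact hl

-- the prefix list is the table of partial sums
lemma pvPrefix_eq (wh : List Int) :
    pvPrefix wh = (List.range (wh.length + 1)).map (fun k => (wh.take k).sum) := by
  induction wh using List.reverseRecOn with
  | nil => simp [pvPrefix]
  | append_singleton wh x ih =>
      unfold pvPrefix at *
      rw [List.foldl_append, ih]
      have hlast : PySem.List.pyGet? ((List.range (wh.length + 1)).map (fun k => (wh.take k).sum)) (-1)
          = some wh.sum := by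
        rw [PySem.List.pyGet?_neg_one]
        rw [List.getLast?_eq_getElem?]
        simp [List.take_of_length_le (le_refl wh.length)]
      simp only [List.foldl_cons, List.foldl_nil, hlast, Option.getD_some]
      have hlen : (wh ++ [x]).length + 1 = (wh.length + 1) + 1 := by simp
      rw [hlen]
      conv_rhs => rw [List.range_succ, List.map_append]
      congr 1
      · apply List.map_congr_left
        intro k hk
        rw [List.mem_range] at hk
        rw [List.take_append_of_le_length (by omega)]
      · simp [List.take_of_length_le]

lemma pvPrefix_getD (wh : List Int) (k : Nat) (hk : k ≤ wh.length) :
    (pvPrefix wh).getD k 0 = (wh.take k).sum := by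
  rw [pvPrefix_eq, List.getD_eq_getElem?_getD, List.getElem?_map,
    List.getElem?_range (by omega)]
  rfl

lemma gsum_shift (wh : List Int) (r : Nat) : gsum wh wh.length r = gsum wh 0 r := by
  induction r with
  | zero => rfl
  | succ r ihr =>
      show gsum wh wh.length r + wh.getD ((wh.length + r) % wh.length) 0
          = gsum wh 0 r + wh.getD ((0 + r) % wh.length) 0
      rw [ihr, Nat.add_mod_left, Nat.zero_add]

-- Source B's g agrees with the wrapping window sum on one cycle
lemma pvG_eq (wh : List Int) (s t : Nat) (hs : s < wh.length) (ht1 : 1 ≤ t)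
    (ht : t ≤ wh.length) :
    pvG (pvPrefix wh) ((pvPrefix wh).getD wh.length 0) wh.length s t = gsum wh s t := by
  have htot : (pvPrefix wh).getD wh.length 0 = wh.sum := by
    rw [pvPrefix_getD wh _ (le_refl _), List.take_of_length_le (le_refl _)]
  unfold pvG
  by_cases hcase : s + t ≤ wh.length
  · rw [if_pos hcase, pvPrefix_getD wh _ hcase, pvPrefix_getD wh _ (by omega),
      gsum_take wh s t hcase]
  · rw [if_neg hcase, htot, pvPrefix_getD wh s (by omega),
      pvPrefix_getD wh _ (by omega)]
    -- split the window at the wrap point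
    have hsplit : t = (wh.length - s) + (s + t - wh.length) := by omega
    have h1 : gsum wh s (wh.length - s) = (wh.take wh.length).sum - (wh.take s).sum := by
      have := gsum_take wh s (wh.length - s) (by omega)
      rwa [show s + (wh.length - s) = wh.length by omega] at this
    have h2 : gsum wh wh.length (s + t - wh.length)
        = (wh.take (s + t - wh.length)).sum := by
      rw [gsum_shift]
      have h2a : (0:Nat) + (s + t - wh.length) ≤ wh.length := by omega
      have h2b := gsum_take wh 0 (s + t - wh.length) h2a
      simpa using h2b
    calc wh.sum - (wh.take s).sum + (wh.take (s + t - wh.length)).sum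
        = gsum wh s (wh.length - s) + gsum wh wh.length (s + t - wh.length) := by
          rw [h1, h2, List.take_of_length_le (le_refl _)]
      _ = gsum wh s ((wh.length - s) + (s + t - wh.length)) := by
          rw [gsum_append wh s (wh.length - s) (s + t - wh.length),
            show s + (wh.length - s) = wh.length by omega]
      _ = gsum wh s t := by rw [← hsplit]

-- the for/break scan finds the least reaching length if it lies within one cycle
lemma pvScan_some (gf : Nat → Int) (item : Int) (τ : Nat)
    (hτ : item ≤ gf τ) :
    ∀ k t0, t0 ≤ τ → τ < t0 + k → (∀ u, t0 ≤ u → u < τ → gf u < item) →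
      pvScan gf item t0 k = some τ := by
  intro k
  induction k with
  | zero => intro t0 h1 h2; omega
  | succ k ih =>
      intro t0 h1 h2 hless
      by_cases he : t0 = τ
      · subst he; rw [pvScan, if_pos hτ]
      · rw [pvScan, if_neg (by
          have := hless t0 (le_refl _) (by omega)
          omega)]
        exact ih (t0+1) (by omega) (by omega) (fun u hu1 hu2 => hless u (by omega) hu2)

lemma pvScan_none (gf : Nat → Int) (item : Int) :
    ∀ k t0, (∀ u, t0 ≤ u → u < t0 + k → gf u < item) →
      pvScan gf item t0 k = none := by
  intro k
  induction k with
  | zero => intro t0 _; rfl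
  | succ k ih =>
      intro t0 h
      rw [pvScan, if_neg (by have := h t0 (le_refl _) (by omega); omega)]
      exact ih (t0+1) (fun u h1 h2 => h u (by omega) (by omega))

-- ceiling division: floordiv (a + S - 1) S is the least q with a ≤ q * S (S > 0)
lemma ceil_le_iff (a S q' : Int) (hS : 0 < S) :
    PySem.Int.floordiv (a + S - 1) S ≤ q' ↔ a ≤ q' * S := by
  rw [PySem.Int.floordiv_eq_ediv_of_pos hS]
  constructor
  · intro h
    have hmul : S * ((a + S - 1) / S) ≤ S * q' := mul_le_mul_of_nonneg_left h (le_of_lt hS)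
    have h2 := Int.mul_ediv_add_emod (a + S - 1) S
    have h3 := Int.emod_lt_of_pos (a + S - 1) hS
    have h4 := Int.emod_nonneg (a + S - 1) (by omega : S ≠ 0)
    rw [mul_comm]
    linarith
  · intro h
    have hle : a + S - 1 ≤ (S - 1) + q' * S := by omega
    calc (a + S - 1) / S ≤ ((S - 1) + q' * S) / S := Int.ediv_le_ediv hS hle
      _ = (S - 1) / S + q' := Int.add_mul_ediv_right _ _ (by omega : S ≠ 0)
      _ = q' := by rw [Int.ediv_eq_zero_of_lt (by omega) (by omega)]; ring

lemma ceil_spec (a S : Int) (hS : 0 < S) :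
    a ≤ (PySem.Int.floordiv (a + S - 1) S) * S :=
  (ceil_le_iff a S _ hS).mp (le_refl _)

-- the min-branch candidate list evaluates to the least reaching length when it
-- exceeds one cycle
lemma min_branch_eq (wh : List Int) (item : Int) (s τ : Nat) (h : 0 < wh.length)
    (hS : 0 < wh.sum)
    (h1 : 1 ≤ τ) (hτ : item ≤ gsum wh s τ)
    (hmin : ∀ t, 1 ≤ t → t < τ → gsum wh s t < item)
    (hbig : wh.length < τ) :
    (((List.range' 1 wh.length).map (fun t0 =>
        t0 + wh.length * (PySem.Int.floordiv (item - gsum wh s t0 + wh.sum - 1) wh.sum).toNat)).min?).getD 0 = τ := by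
  set n := wh.length with hn
  set c : Nat → Nat := fun t0 =>
    t0 + n * (PySem.Int.floordiv (item - gsum wh s t0 + wh.sum - 1) wh.sum).toNat with hc
  -- every candidate reaches item, hence τ ≤ every candidate
  have hτle : ∀ t0, 1 ≤ t0 → t0 ≤ n → τ ≤ c t0 := by
    intro t0 ht1 ht2
    set q : Int := PySem.Int.floordiv (item - gsum wh s t0 + wh.sum - 1) wh.sum with hqdef
    have hq1 : item - gsum wh s t0 ≤ q * wh.sum := ceil_spec _ _ hS
    have ha : 1 ≤ item - gsum wh s t0 := by
      have := hmin t0 ht1 (by omega)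
      omega
    have hq0 : 1 ≤ q := by
      by_contra hneg
      push_neg at hneg
      have h0 : item - gsum wh s t0 ≤ 0 * wh.sum := (ceil_le_iff _ _ 0 hS).mp (by omega)
      simp at h0
      omega
    have hcval : c t0 = t0 + q.toNat * n := by
      simp only [hc]
      ring
    have hreach : item ≤ gsum wh s (c t0) := by
      rw [hcval, gsum_cycles wh h s t0 q.toNat]
      have hcast : (q.toNat : Int) = q := Int.toNat_of_nonneg (by omega)
      rw [hcast]
      omega
    by_contra hlt
    push_neg at hlt
    have hc1 : 1 ≤ c t0 := by omega
    exact absurd hreach (by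
      have := hmin (c t0) hc1 hlt
      omega)
  -- the candidate of τ's own residue class is ≤ τ
  obtain ⟨u, rfl⟩ : ∃ u, τ = u + 1 := ⟨τ - 1, by omega⟩
  have hdm := Nat.div_add_mod u n
  set qs := u / n with hqs
  set rs := u % n with hrs
  have hτdec : u + 1 = (rs + 1) + qs * n := by
    rw [Nat.mul_comm] at hdm
    linarith
  have hrlt : rs < n := Nat.mod_lt u h
  have hτg : item ≤ gsum wh s (rs + 1) + (qs : Int) * wh.sum := by
    have e1 : gsum wh s ((rs + 1) + qs * n) = gsum wh s (rs + 1) + (qs : Int) * wh.sum :=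
      gsum_cycles wh h s (rs + 1) qs
    rw [← hτdec] at e1
    linarith [hτ, le_of_eq e1.symm]
  have hceil : PySem.Int.floordiv (item - gsum wh s (rs + 1) + wh.sum - 1) wh.sum ≤ (qs : Int) :=
    (ceil_le_iff _ _ _ hS).mpr (by linarith)
  have htn : (PySem.Int.floordiv (item - gsum wh s (rs + 1) + wh.sum - 1) wh.sum).toNat ≤ qs := by
    have h0 := Int.toNat_le_toNat hceil
    simpa using h0
  have hcle : c (rs + 1) ≤ u + 1 := by
    have : c (rs + 1)
        = (rs + 1) + n * (PySem.Int.floordiv (item - gsum wh s (rs + 1) + wh.sum - 1) wh.sum).toNat := rfl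
    rw [this, hτdec, Nat.mul_comm qs n]
    exact Nat.add_le_add_left (Nat.mul_le_mul_left n htn) _
  -- min? of the nonempty candidate list
  have hne : ((List.range' 1 n).map c) ≠ [] := by
    simp [List.range'_eq_nil_iff]
    omega
  obtain ⟨m, hm⟩ := Option.isSome_iff_exists.mp (by
    rw [Option.isSome_iff_ne_none, Ne, List.min?_eq_none_iff]
    exact hne : (((List.range' 1 n).map c).min?).isSome)
  rw [hm, Option.getD_some]
  obtain ⟨hmem, hle⟩ := List.min?_eq_some_iff.mp hm
  obtain ⟨t0, ht0mem, ht0eq⟩ := List.mem_map.mp hmem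
  rw [List.mem_range'] at ht0mem
  obtain ⟨i, hi1, hi2⟩ := ht0mem
  have hτm : u + 1 ≤ m := by
    rw [← ht0eq]
    exact hτle t0 (by omega) (by omega)
  have hmem2 : c (rs + 1) ∈ (List.range' 1 n).map c :=
    List.mem_map_of_mem (by
      rw [List.mem_range']
      exact ⟨rs, by omega, by omega⟩)
  have hmτ : m ≤ c (rs + 1) := hle _ hmem2
  omega

-- a positive total stock guarantees a reaching length, with the fuel bound
lemma exists_reach_pos (wh : List Int) (item : Int) (s : Nat) (h : 0 < wh.length)
    (hs : s < wh.length) (hS : 0 < wh.sum) :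
    ∃ t, (1 ≤ t ∧ item ≤ gsum wh s t) ∧ t ≤ 1 + (item.toNat + pvAbsSum wh) * wh.length := by
  have hmem : wh.getD s 0 ∈ wh := by
    rw [List.getD_eq_getElem?_getD, List.getElem?_eq_getElem hs]
    exact List.getElem_mem hs
  set q := item.toNat + pvAbsSum wh with hq
  refine ⟨1 + q * wh.length, ⟨by omega, ?_⟩, le_refl _⟩
  rw [gsum_cycles wh h s 1 q, gsum_one_lt wh s hs]
  have h1 : -(pvAbsSum wh : Int) ≤ wh.getD s 0 := by
    have := abs_le_absSum wh _ hmem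
    omega
  have h2 : (q : Int) ≤ q * wh.sum := by
    calc (q:Int) = q * 1 := by ring
      _ ≤ q * wh.sum := by
          apply mul_le_mul_of_nonneg_left (by omega) (by positivity)
  have h3 : (item.toNat : Int) + pvAbsSum wh = (q : Int) := by push_cast [hq]; ring
  have h4 : item ≤ (item.toNat : Int) := Int.self_le_toNat item
  omega

-- per-task: B's closed-form index equals A's walked index, and when reachability within
-- one cycle holds the result is the (s + leastR - 1) % n slot of the precondition's walk
lemma step_eq (wh : List Int) (item : Int) (s : Nat) (h : 0 < wh.length)
    (hs : s < wh.length) (hc : 0 < wh.sum ∨ pvReach wh s item = true) :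
    pvFindB wh item s = findLastWarehouseId item wh s ∧
      (pvReach wh s item = true →
        findLastWarehouseId item wh s = (s + pvLeastR wh s item - 1) % wh.length) := by
  -- a reaching length exists, with a bound fitting A's fuel
  have hex : ∃ t, 1 ≤ t ∧ item ≤ gsum wh s t := by
    rcases hc with hS | hr
    · obtain ⟨t, ⟨h1, h2⟩, _⟩ := exists_reach_pos wh item s h hs hS
      exact ⟨t, h1, h2⟩
    · obtain ⟨r, h1, h2, h3⟩ := (pvReach_iff wh s item).mp hr
      exact ⟨r, h1, by rwa [← pvWin_eq_gsum wh s r hs h2]⟩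
  set τ := Nat.find hex with hτdef
  obtain ⟨hτ1, hτ2⟩ := Nat.find_spec hex
  have hmin : ∀ t, 1 ≤ t → t < τ → gsum wh s t < item := by
    intro t ht1 ht2
    have := Nat.find_min hex ht2
    push_neg at this
    exact this ht1
  -- whenever within-one-cycle reachability holds, τ ≤ n and the walk state matches
  have hτn : pvReach wh s item = true → τ ≤ wh.length := by
    intro hr
    obtain ⟨r, h1, h2, h3⟩ := (pvReach_iff wh s item).mp hr
    exact le_trans (Nat.find_min' hex ⟨h1, by rwa [← pvWin_eq_gsum wh s r hs h2]⟩) h2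
  have hbound : τ ≤ 1 + (item.toNat + pvAbsSum wh) * wh.length := by
    rcases hc with hS | hr
    · obtain ⟨t, ⟨h1, h2⟩, h3⟩ := exists_reach_pos wh item s h hs hS
      exact le_trans (Nat.find_min' hex ⟨h1, h2⟩) h3
    · by_cases hX : item.toNat + pvAbsSum wh = 0
      · -- all slots are 0 and item ≤ 0, so the very first slot already reaches
        have hz : wh.getD s 0 = 0 := by
          have hmem : wh.getD s 0 ∈ wh := by
            rw [List.getD_eq_getElem?_getD, List.getElem?_eq_getElem hs]
            exact List.getElem_mem hs
          have := abs_le_absSum wh _ hmem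
          omega
        have hitem : item ≤ 0 := by omega
        have h1r : item ≤ gsum wh s 1 := by rw [gsum_one_lt wh s hs, hz]; exact hitem
        have : τ ≤ 1 := Nat.find_min' hex ⟨le_refl _, h1r⟩
        omega
      · have := hτn hr
        have hX1 : 1 ≤ item.toNat + pvAbsSum wh := by omega
        have : wh.length ≤ (item.toNat + pvAbsSum wh) * wh.length :=
          le_trans (by omega) (Nat.mul_le_mul_right wh.length hX1)
        omega
  have hA : findLastWarehouseId item wh s = (s + (τ-1)) % wh.length :=
    findA_eq wh item s τ h hs hτ1 hτ2 hmin hbound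
  constructor
  · rw [hA]
    unfold pvFindB
    simp only []
    by_cases hcase : τ ≤ wh.length
    · rw [pvScan_some _ item τ
        (by rw [pvG_eq wh s τ hs hτ1 hcase]; exact hτ2) wh.length 1 hτ1 (by omega)
        (fun u hu1 hu2 => by
          rw [pvG_eq wh s u hs hu1 (by omega)]
          exact hmin u hu1 hu2)]
      rw [Option.getD_some]
      rw [show s + τ - 1 = s + (τ - 1) by omega]
    · push_neg at hcase
      have hS : 0 < wh.sum := by
        rcases hc with hS | hr
        · exact hS
        · exact absurd (hτn hr) (by omega)
      rw [pvScan_none _ item wh.length 1 (fun u hu1 hu2 => by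
        rw [pvG_eq wh s u hs hu1 (by omega)]
        exact hmin u hu1 (by omega))]
      rw [Option.getD_none]
      have htot : (pvPrefix wh).getD wh.length 0 = wh.sum := by
        rw [pvPrefix_getD wh _ (le_refl _), List.take_of_length_le (le_refl _)]
      have hmap : ((List.range' 1 wh.length).map (fun t0 =>
          t0 + wh.length * (PySem.Int.floordiv
            (item - pvG (pvPrefix wh) ((pvPrefix wh).getD wh.length 0) wh.length s t0
              + (pvPrefix wh).getD wh.length 0 - 1) ((pvPrefix wh).getD wh.length 0)).toNat))
          = ((List.range' 1 wh.length).map (fun t0 =>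
          t0 + wh.length * (PySem.Int.floordiv (item - gsum wh s t0 + wh.sum - 1) wh.sum).toNat)) := by
        apply List.map_congr_left
        intro t0 ht0
        rw [List.mem_range'] at ht0
        obtain ⟨i, hi1, hi2⟩ := ht0
        rw [pvG_eq wh s t0 hs (by omega) (by omega), htot]
      rw [hmap, min_branch_eq wh item s τ h hS hτ1 hτ2 hmin hcase]
      rw [show s + τ - 1 = s + (τ - 1) by omega]
  · intro hr
    have hτle := hτn hr
    have hleast : pvLeastR wh s item = τ := by
      unfold pvLeastR
      rw [find?_range'_eq (fun r => decide (item ≤ pvWin wh s r)) τ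
        (by rw [decide_eq_true_iff, pvWin_eq_gsum wh s τ hs hτle]; exact hτ2)
        wh.length 1 hτ1 (by omega)
        (fun u hu1 hu2 => by
          rw [decide_eq_false_iff_not, pvWin_eq_gsum wh s u hs (by omega), not_le]
          exact hmin u hu1 hu2)]
      rfl
    rw [hA, hleast, show s + τ - 1 = s + (τ - 1) by omega]

-- both folds preserve equal states with an in-range start slot, under the declarative
-- termination condition for the current state
lemma fold_eq (wh : List Int) (h : 0 < wh.length) :
    ∀ (ts : List Int) (s : Nat) (out : List Int), s < wh.length →
      (0 < wh.sum ∨ pvPreLoop wh s ts = true) →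
      ts.foldl (solA_step wh) (s, out) = ts.foldl (solB_step wh) (s, out) := by
  intro ts
  induction ts with
  | nil => intro s out _ _; rfl
  | cons it ts ih =>
      intro s out hs hc
      rw [List.foldl_cons, List.foldl_cons]
      by_cases hneg : it = -1
      · rw [solA_step, solB_step, if_pos hneg, if_pos hneg]
        refine ih 0 out h ?_
        rcases hc with hS | hpl
        · exact Or.inl hS
        · rw [pvPreLoop, if_pos hneg] at hpl
          exact Or.inr hpl
      · have hcit : 0 < wh.sum ∨ pvReach wh s it = true := by
          rcases hc with hS | hpl
          · exact Or.inl hS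
          · rw [pvPreLoop, if_neg hneg, Bool.and_eq_true] at hpl
            exact Or.inr hpl.1
        obtain ⟨hfe, hst⟩ := step_eq wh it s h hs hcit
        rw [solA_step, solB_step, if_neg hneg, if_neg hneg]
        simp only []
        rw [hfe]
        refine ih _ _ ?_ ?_
        · rw [← hfe]
          unfold pvFindB
          exact Nat.mod_lt _ h
        · rcases hc with hS | hpl
          · exact Or.inl hS
          · rw [pvPreLoop, if_neg hneg, Bool.and_eq_true] at hpl
            rw [← hfe, hfe, hst hpl.1]
            exact Or.inr hpl.2

-- with an empty task effect only (every task is -1), both folds keep the initial state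
lemma fold_all_neg (wh : List Int) :
    ∀ (ts : List Int) (out : List Int), (∀ t ∈ ts, t = -1) →
      ts.foldl (solA_step wh) (0, out) = (0, out) ∧
      ts.foldl (solB_step wh) (0, out) = (0, out) := by
  intro ts
  induction ts with
  | nil => intro out _; exact ⟨rfl, rfl⟩
  | cons it ts ih =>
      intro out hall
      have hneg : it = -1 := hall it List.mem_cons_self
      rw [List.foldl_cons, List.foldl_cons, solA_step, solB_step, if_pos hneg, if_pos hneg]
      exact ih out (fun u hu => hall u (List.mem_cons_of_mem _ hu))

-- ===== VERDICT (by name: the statement is the Claim_ definition above) =====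
theorem solution_spec : Claim_equal_solution := by
  intro warehouse tasks _ hpre
  obtain ⟨hne, hc⟩ := hpre
  unfold Spec_solution solution solution_alt
  by_cases hemp : warehouse = []
  · have hall : ∀ t ∈ tasks, t = -1 := by
      rcases hne with hne | hall
      · exact absurd hemp hne
      · exact hall
    obtain ⟨hA, hB⟩ := fold_all_neg warehouse tasks [] hall
    rw [hA, hB]
  · have h : 0 < warehouse.length := List.length_pos_iff.mpr hemp
    rw [fold_eq warehouse h tasks 0 [] h hc]
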